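-- pv_equiv track=rewrite | github.com/simone-chen/aiconfigurator | src/aiconfigurator/sdk/perf_database.py | _nearest_1d_point_helper
-- ===== SOURCE A (Python) =====
-- from typing import Optional, Dict, Any, List, Tuple
--
-- def _nearest_1d_point_helper(x:int, values:List[int], inner_only:bool=True) -> Tuple[int, int]:
--     """
--     Find the nearest 1d point
--     """
--     assert(values is not None and len(values) >= 2), f"values is None or len(values) < 2"
--     sorted_values = sorted(values)
--
--     if x < sorted_values[0]:
--         if inner_only:
--             raise ValueError(f"x is less than the smallest value in the list. {x=}, {sorted_values=}")
--         else:
--             return sorted_values[0], sorted_values[1]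
--     elif x > sorted_values[-1]:
--         if inner_only:
--             raise ValueError(f"x is greater than the largest value in the list. {x=}, {sorted_values=}")
--         else:
--             return sorted_values[-2], sorted_values[-1]
--
--     for i, value in enumerate(sorted_values):
--         if x >= value and i != len(sorted_values)-1:
--             continue
--         else:
--             end = value
--             start = sorted_values[i-1]
--             break
--     if start is None or end is None:
--         raise ValueError(f"start or end is None. {x=}, {sorted_values=}, start={start=}, end={end=}")
--     return start, end
-- ===== SOURCE B (Python) =====
-- from typing import List, Tuple
--
-- def _nearest_1d_point_helper(x: int, values: List[int], inner_only: bool = True) -> Tuple[int, int]: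
--     """Find the bracketing pair via binary search instead of a linear scan."""
--     assert(values is not None and len(values) >= 2), "values is None or len(values) < 2"
--     s = sorted(values)
--     if x < s[0] or x > s[-1]:
--         if inner_only:
--             raise ValueError(f"x is outside the range of the list. {x=}, {s=}")
--         return (s[0], s[1]) if x < s[0] else (s[-2], s[-1])
--     # binary search: first index whose element is > x (bisect_right)
--     lo, hi = 0, len(s)
--     while lo < hi:
--         mid = (lo + hi) // 2
--         if s[mid] <= x:
--             lo = mid + 1
--         else:
--             hi = mid
--     i = lo if lo < len(s) else len(s) - 1
--     return s[i - 1], s[i]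
-- ===== Notes on version B (the rewrite author's own statement) =====
-- stated objective: alternative
-- what changed: Replaced A's linear enumerate-with-continue/break scan over the sorted list by a hand-written bisect_right binary search (with the same cap at the last index when x equals the maximum), keeping the sort and boundary guards.
import Mathlib
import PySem

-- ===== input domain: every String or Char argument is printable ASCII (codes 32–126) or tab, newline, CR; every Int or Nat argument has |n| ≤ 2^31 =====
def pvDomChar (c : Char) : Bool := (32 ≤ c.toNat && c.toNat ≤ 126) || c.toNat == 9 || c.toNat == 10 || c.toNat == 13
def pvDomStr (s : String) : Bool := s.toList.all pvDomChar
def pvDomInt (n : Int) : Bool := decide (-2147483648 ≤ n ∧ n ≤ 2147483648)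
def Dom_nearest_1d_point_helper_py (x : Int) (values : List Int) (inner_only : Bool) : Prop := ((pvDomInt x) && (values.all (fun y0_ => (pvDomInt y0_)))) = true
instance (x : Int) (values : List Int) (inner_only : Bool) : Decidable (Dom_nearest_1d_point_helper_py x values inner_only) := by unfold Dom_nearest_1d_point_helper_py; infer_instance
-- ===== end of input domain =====

-- B replaces A's linear enumerate-and-break scan with a hand-rolled binary search for the
-- first element greater than x (objective: alternative algorithm; faster only asymptotically
-- after the O(n log n) sort, so no overall speed claim).

-- ===== PORT A =====
-- A's for-loop over enumerate(sorted_values) with continue/break; [] is unreachable on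
-- inputs where Python returns (the loop always breaks on a nonempty list).
def loopA (x : Int) (s : List Int) : List (Int × Int) → Int × Int
  | [] => (0, 0)
  | (i, v) :: rest =>
    if x ≥ v ∧ i ≠ (s.length : Int) - 1 then loopA x s rest
    else ((PySem.List.pyGet? s (i - 1)).getD 0, v)

def nearest_1d_point_helper_py (x : Int) (values : List Int) (inner_only : Bool) : Int × Int :=
  let s := PySem.List.sorted values (fun v => v)
  if x < (PySem.List.pyGet? s 0).getD 0 then
    if inner_only then (0, 0)  -- raise ValueError (excluded by Pre_)
    else ((PySem.List.pyGet? s 0).getD 0, (PySem.List.pyGet? s 1).getD 0)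
  else if x > (PySem.List.pyGet? s (-1)).getD 0 then
    if inner_only then (0, 0)  -- raise ValueError (excluded by Pre_)
    else ((PySem.List.pyGet? s (-2)).getD 0, (PySem.List.pyGet? s (-1)).getD 0)
  else loopA x s (PySem.List.enumerate s)

-- ===== PORT B =====
-- the while lo < hi binary-search loop of Source B
def bsLoop (x : Int) (s : List Int) (lo hi : Nat) : Nat :=
  if h : lo < hi then
    let mid := (lo + hi) / 2
    if (PySem.List.pyGet? s ((mid : Int))).getD 0 ≤ x then bsLoop x s (mid + 1) hi
    else bsLoop x s lo mid
  else lo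
termination_by hi - lo
decreasing_by all_goals omega

def nearest_1d_point_helper_py_alt (x : Int) (values : List Int) (inner_only : Bool) : Int × Int :=
  let s := PySem.List.sorted values (fun v => v)
  if x < (PySem.List.pyGet? s 0).getD 0 ∨ x > (PySem.List.pyGet? s (-1)).getD 0 then
    if inner_only then (0, 0)  -- raise ValueError (excluded by Pre_)
    else if x < (PySem.List.pyGet? s 0).getD 0 then
      ((PySem.List.pyGet? s 0).getD 0, (PySem.List.pyGet? s 1).getD 0)
    else ((PySem.List.pyGet? s (-2)).getD 0, (PySem.List.pyGet? s (-1)).getD 0)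
  else
    let lo := bsLoop x s 0 s.length
    let i : Nat := if lo < s.length then lo else s.length - 1
    ((PySem.List.pyGet? s ((i : Int) - 1)).getD 0, (PySem.List.pyGet? s ((i : Int))).getD 0)

-- ===== PRECONDITION & SPEC =====
-- Pre_ excludes exactly the inputs where Python A raises: lists shorter than 2 (AssertionError)
-- and, when inner_only is true, x outside [min(values), max(values)] (ValueError).
def Pre_nearest_1d_point_helper_py (x : Int) (values : List Int) (inner_only : Bool) : Prop :=
  2 ≤ values.length ∧ (inner_only = true → ((∃ v ∈ values, v ≤ x) ∧ (∃ v ∈ values, x ≤ v)))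
instance (x : Int) (values : List Int) (inner_only : Bool) : Decidable (Pre_nearest_1d_point_helper_py x values inner_only) := by unfold Pre_nearest_1d_point_helper_py; infer_instance

def pvWitness_nearest_1d_point_helper_py : Int × List Int × Bool := (5, ([1, 10], true))

def Spec_nearest_1d_point_helper_py (x : Int) (values : List Int) (inner_only : Bool) (out : Int × Int) : Prop := out = nearest_1d_point_helper_py_alt x values inner_only
instance (x : Int) (values : List Int) (inner_only : Bool) (out : Int × Int) : Decidable (Spec_nearest_1d_point_helper_py x values inner_only out) := by unfold Spec_nearest_1d_point_helper_py; infer_instance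

-- ===== CLAIM (what is proved, stated in full; the proofs are below) =====
def Claim_equal_nearest_1d_point_helper_py : Prop := ∀ (x : Int) (values : List Int) (inner_only : Bool), Dom_nearest_1d_point_helper_py x values inner_only → Pre_nearest_1d_point_helper_py x values inner_only → Spec_nearest_1d_point_helper_py x values inner_only (nearest_1d_point_helper_py x values inner_only)

-- ===== LEMMAS AND PROOFS =====

-- monotonicity of the sorted list, phrased through the total getter used everywhere below
theorem pv_gd_mono (s : List Int) (hs : s.Pairwise (fun a b => a ≤ b))
    (i j : Nat) (hij : i ≤ j) (hj : j < s.length) : s[i]?.getD 0 ≤ s[j]?.getD 0 := by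
  rcases Nat.lt_or_ge i j with h | h
  · have := (List.pairwise_iff_getElem.mp hs) i j (by omega) hj h
    simp [List.getElem?_eq_getElem, hj, show i < s.length by omega] at *
    exact this
  · have : i = j := by omega
    subst this; exact le_rfl

-- the binary-search loop returns an index splitting the sorted list at x (bisect_right)
theorem pv_bsLoop_spec (x : Int) (s : List Int) (hs : s.Pairwise (fun a b => a ≤ b)) :
    ∀ (n lo hi : Nat), hi - lo ≤ n → lo ≤ hi → hi ≤ s.length →
    (∀ j, j < lo → s[j]?.getD 0 ≤ x) → (∀ j, hi ≤ j → j < s.length → x < s[j]?.getD 0) →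
    bsLoop x s lo hi ≤ s.length ∧
    (∀ j, j < bsLoop x s lo hi → s[j]?.getD 0 ≤ x) ∧
    (∀ j, bsLoop x s lo hi ≤ j → j < s.length → x < s[j]?.getD 0) := by
  intro n
  induction n with
  | zero =>
    intro lo hi hfuel hlh hhn hbelow habove
    have : ¬ lo < hi := by omega
    rw [bsLoop]; simp [this]
    exact ⟨by omega, hbelow, fun j hj hjn => habove j (by omega) hjn⟩
  | succ n ih =>
    intro lo hi hfuel hlh hhn hbelow habove
    rw [bsLoop]
    by_cases h : lo < hi
    · simp only [h, dif_pos]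
      by_cases hm : (PySem.List.pyGet? s (((lo + hi) / 2 : Nat) : Int)).getD 0 ≤ x
      · simp only [hm, if_pos]
        simp only [PySem.List.pyGet?_natCast] at hm
        refine ih ((lo + hi) / 2 + 1) hi (by omega) (by omega) hhn ?_ habove
        intro j hj
        rcases Nat.lt_or_ge j lo with hjl | hjl
        · exact hbelow j hjl
        · exact le_trans (pv_gd_mono s hs j ((lo + hi) / 2) (by omega) (by omega)) hm
      · simp only [hm, if_neg, not_false_iff]
        refine ih lo ((lo + hi) / 2) (by omega) (by omega) (by omega) hbelow ?_
        intro j hj hjn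
        have hmid : x < s[(lo + hi) / 2]?.getD 0 := by
          simp only [PySem.List.pyGet?_natCast] at hm
          omega
        exact lt_of_lt_of_le hmid (pv_gd_mono s hs ((lo + hi) / 2) j hj hjn)
    · simp only [h, dif_neg, not_false_iff]
      exact ⟨by omega, hbelow, fun j hj hjn => habove j (by omega) hjn⟩

-- A's scan from position k, given that it continues strictly before r and breaks at r
theorem pv_loopA_run (x : Int) (s : List Int) (r : Nat) (hr : r < s.length)
    (hbef : ∀ j, j < r → x ≥ s[j]?.getD 0 ∧ (j : Int) ≠ (s.length : Int) - 1)
    (hbrk : ¬(x ≥ s[r]?.getD 0 ∧ (r : Int) ≠ (s.length : Int) - 1)) :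
    ∀ (n k : Nat), r - k ≤ n → k ≤ r →
    loopA x s (PySem.List.enumerate (s.drop k) (k : Int)) =
      ((PySem.List.pyGet? s ((r : Int) - 1)).getD 0, s[r]?.getD 0) := by
  intro n
  induction n with
  | zero =>
    intro k hfuel hk
    have hkr : k = r := by omega
    subst hkr
    have hdrop : s.drop k = s[k] :: s.drop (k + 1) := (List.getElem_cons_drop hr).symm
    rw [hdrop, PySem.List.enumerate_cons, loopA]
    have hgd : s[k]?.getD 0 = s[k] := by simp [List.getElem?_eq_getElem, hr]
    rw [hgd] at hbrk
    simp [hbrk, hgd]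
  | succ n ih =>
    intro k hfuel hk
    rcases Nat.lt_or_ge k r with hkr | hkr
    · have hkn : k < s.length := by omega
      have hdrop : s.drop k = s[k] :: s.drop (k + 1) := (List.getElem_cons_drop hkn).symm
      rw [hdrop, PySem.List.enumerate_cons, loopA]
      have hc := hbef k hkr
      have hgd : s[k]?.getD 0 = s[k] := by simp [List.getElem?_eq_getElem, hkn]
      rw [hgd] at hc
      rw [if_pos hc]
      have : ((k : Int) + 1) = (((k + 1 : Nat)) : Int) := by push_cast; ring
      rw [this]
      exact ih (k + 1) (by omega) (by omega)
    · have hkr' : k = r := by omega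
      subst hkr'
      have hdrop : s.drop k = s[k] :: s.drop (k + 1) := (List.getElem_cons_drop hr).symm
      rw [hdrop, PySem.List.enumerate_cons, loopA]
      have hgd : s[k]?.getD 0 = s[k] := by simp [List.getElem?_eq_getElem, hr]
      rw [hgd] at hbrk
      simp [hbrk, hgd]

-- ===== VERDICT (by name: the statement is the Claim_ definition above) =====
theorem nearest_1d_point_helper_py_spec : Claim_equal_nearest_1d_point_helper_py := by
  intro x values inner_only _hdom hpre
  unfold Spec_nearest_1d_point_helper_py
  unfold nearest_1d_point_helper_py nearest_1d_point_helper_py_alt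
  set s := PySem.List.sorted values (fun v => v) with hsdef
  have hperm : s.Perm values := PySem.List.sorted_perm values (fun v => v) false
  have hlen : 2 ≤ s.length := by rw [hperm.length_eq]; exact hpre.1
  have hs : s.Pairwise (fun a b => a ≤ b) := PySem.List.sorted_pairwise values (fun v => v)
  by_cases hc1 : x < (PySem.List.pyGet? s 0).getD 0
  · simp [hc1]
  · by_cases hc2 : x > (PySem.List.pyGet? s (-1)).getD 0
    · simp [hc1, hc2]
    · simp only [hc1, hc2, if_neg, not_false_iff, or_self, if_false, or_false]
      -- main branch: A's scan equals B's capped bisect index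
      obtain ⟨hrle, hbelow, habove⟩ :=
        pv_bsLoop_spec x s hs s.length 0 s.length (by omega) (by omega) le_rfl
          (by omega) (fun j hj hjn => by omega)
      set r := bsLoop x s 0 s.length with hrdef
      set i : Nat := if r < s.length then r else s.length - 1 with hidef
      have hi : i < s.length := by rw [hidef]; split <;> omega
      have hile : i ≤ r := by rw [hidef]; split <;> omega
      have hbef : ∀ j, j < i → x ≥ s[j]?.getD 0 ∧ (j : Int) ≠ (s.length : Int) - 1 := by
        intro j hj
        constructor
        · exact hbelow j (by omega)
        · have : j < s.length - 1 := by omega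
          omega
      have hbrk : ¬(x ≥ s[i]?.getD 0 ∧ (i : Int) ≠ (s.length : Int) - 1) := by
        rw [hidef]
        split
        · rename_i hrn
          by_cases hlast : r = s.length - 1
          · rw [hlast]; intro hcon; exact hcon.2 (by omega)
          · intro hcon
            exact absurd hcon.1 (not_le.mpr (habove r le_rfl hrn))
        · intro hcon; exact hcon.2 (by omega)
      have hrun := pv_loopA_run x s i hi hbef hbrk i 0 (by omega) (by omega)
      simp only [List.drop_zero, Int.natCast_zero] at hrun
      rw [hrun]
      simp [PySem.List.pyGet?_natCast]
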